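-- pv_equiv track=rewrite | github.com/gianniboccazzi/Teoria-de-Algoritmos-1 | TP3/src/verificador.py | verificador_hitting_set
-- ===== SOURCE A (Python) =====
-- def verificador_hitting_set(A, C, subconjuntos, k):
--     subconjuntos_intersecados = []
--     if len(C) > k or len(C) == 0:
--         return False
--     for jugador in C:
--         if jugador not in A:
--             return False
--         if len(subconjuntos_intersecados) == len(subconjuntos):
--             continue
--         for subconjunto in subconjuntos:
--             if jugador in subconjunto and subconjunto not in subconjuntos_intersecados:
--                 subconjuntos_intersecados.append(subconjunto)
--     return len(subconjuntos_intersecados) == len(subconjuntos)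
-- ===== SOURCE B (Python) =====
-- def verificador_hitting_set(A, C, subconjuntos, k):
--     if len(C) == 0 or len(C) > k:
--         return False
--     a_set = set(A)
--     if not all(c in a_set for c in C):
--         return False
--     c_set = set(C)
--     hit = set()
--     for s in subconjuntos:
--         if any(x in c_set for x in s):
--             hit.add(tuple(s))
--     return len(hit) == len(subconjuntos)
-- ===== Notes on version B (the rewrite author's own statement) =====
-- stated objective: alternative
-- what changed: Replaces the nested per-candidate scan over subsets (with list membership tests against A and against the accumulated list) by hash sets: one pass over the subsets marking each hit subset in a set, with O(1) membership lookups.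
import Mathlib
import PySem

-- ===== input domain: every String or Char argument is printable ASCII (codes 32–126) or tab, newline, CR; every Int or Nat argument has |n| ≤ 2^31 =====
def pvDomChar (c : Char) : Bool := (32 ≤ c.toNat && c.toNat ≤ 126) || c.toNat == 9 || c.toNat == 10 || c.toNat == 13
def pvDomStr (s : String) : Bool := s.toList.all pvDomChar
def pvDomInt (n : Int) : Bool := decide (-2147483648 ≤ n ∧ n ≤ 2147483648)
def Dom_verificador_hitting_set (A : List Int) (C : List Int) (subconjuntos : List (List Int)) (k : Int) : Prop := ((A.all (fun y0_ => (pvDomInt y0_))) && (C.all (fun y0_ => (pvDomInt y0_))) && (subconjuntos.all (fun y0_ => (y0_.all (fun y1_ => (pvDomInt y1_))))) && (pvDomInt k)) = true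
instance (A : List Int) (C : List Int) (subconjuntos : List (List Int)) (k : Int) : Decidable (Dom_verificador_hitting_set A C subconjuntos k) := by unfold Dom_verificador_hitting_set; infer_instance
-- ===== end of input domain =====

-- B replaces A's nested list-membership scans by hash sets and a single pass over the subsets marking each hit subset (alternative algorithm; no speed-up measured).


-- ===== PORT A =====
-- inner 'for subconjunto in subconjuntos' loop of A
def verifInner (jugador : Int) (subs : List (List Int)) (inter : List (List Int)) : List (List Int) :=
  match subs with
  | [] => inter
  | s :: rest =>
      verifInner jugador rest (if jugador ∈ s ∧ s ∉ inter then inter ++ [s] else inter)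

-- outer 'for jugador in C' loop of A, including the early 'return False' and the final
-- 'return len(subconjuntos_intersecados) == len(subconjuntos)'
def verifOuter (A : List Int) (subs : List (List Int)) (C : List Int) (inter : List (List Int)) : Bool :=
  match C with
  | [] => inter.length == subs.length
  | j :: rest =>
      if j ∈ A then
        verifOuter A subs rest (if inter.length = subs.length then inter else verifInner j subs inter)
      else false

def verificador_hitting_set (A : List Int) (C : List Int) (subconjuntos : List (List Int)) (k : Int) : Bool :=
  if (C.length : Int) > k ∨ C.length = 0 then false
  else verifOuter A subconjuntos C []

-- ===== PORT B =====
def verificador_hitting_set_alt (A : List Int) (C : List Int) (subconjuntos : List (List Int)) (k : Int) : Bool :=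
  if C.length = 0 ∨ (C.length : Int) > k then false
  else
    let aSet : PySem.Set Int := PySem.Set.ofList A
    if ¬ (C.all (fun c => PySem.Set.contains aSet c)) then false
    else
      let cSet : PySem.Set Int := PySem.Set.ofList C
      let hit : PySem.Set (List Int) :=
        subconjuntos.foldl
          (fun h s => if s.any (fun x => PySem.Set.contains cSet x) then PySem.Set.add h s else h)
          PySem.Set.empty
      hit.length == subconjuntos.length

-- ===== PRECONDITION & SPEC =====
def Spec_verificador_hitting_set (A : List Int) (C : List Int) (subconjuntos : List (List Int)) (k : Int) (out : Bool) : Prop := out = verificador_hitting_set_alt A C subconjuntos k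
instance (A : List Int) (C : List Int) (subconjuntos : List (List Int)) (k : Int) (out : Bool) : Decidable (Spec_verificador_hitting_set A C subconjuntos k out) := by unfold Spec_verificador_hitting_set; infer_instance

-- ===== CLAIM (what is proved, stated in full; the proofs are below) =====
def Claim_equal_verificador_hitting_set : Prop := ∀ (A : List Int) (C : List Int) (subconjuntos : List (List Int)) (k : Int), Dom_verificador_hitting_set A C subconjuntos k → Spec_verificador_hitting_set A C subconjuntos k (verificador_hitting_set A C subconjuntos k)

-- ===== LEMMAS AND PROOFS =====

theorem mem_verifInner (j : Int) (subs : List (List Int)) (inter : List (List Int)) (x : List Int) :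
    x ∈ verifInner j subs inter ↔ x ∈ inter ∨ (x ∈ subs ∧ j ∈ x) := by
  induction subs generalizing inter with
  | nil => simp [verifInner]
  | cons s rest ih =>
      simp only [verifInner, ih, List.mem_cons]
      split_ifs with h
      · simp only [List.mem_append, List.mem_cons, List.not_mem_nil, or_false]
        rcases h with ⟨hjs, _⟩
        constructor
        · rintro ((hx | rfl) | ⟨hx, hj⟩)
          · exact .inl hx
          · exact .inr ⟨.inl rfl, hjs⟩
          · exact .inr ⟨.inr hx, hj⟩
        · rintro (hx | ⟨(rfl | hx), hj⟩)
          · exact .inl (.inl hx)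
          · exact .inl (.inr rfl)
          · exact .inr ⟨hx, hj⟩
      · have h' : j ∈ s → s ∈ inter := by tauto
        constructor
        · rintro (hx | ⟨hx, hj⟩)
          · exact .inl hx
          · exact .inr ⟨.inr hx, hj⟩
        · rintro (hx | ⟨(rfl | hx), hj⟩)
          · exact .inl hx
          · exact .inl (h' hj)
          · exact .inr ⟨hx, hj⟩

theorem nodup_verifInner (j : Int) (subs : List (List Int)) (inter : List (List Int))
    (hn : inter.Nodup) : (verifInner j subs inter).Nodup := by
  induction subs generalizing inter with
  | nil => exact hn
  | cons s rest ih =>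
      simp only [verifInner]
      apply ih
      split_ifs with h
      · exact List.Nodup.append hn (List.nodup_singleton s) (by simpa using h.2)
      · exact hn

theorem verifInner_noop (j : Int) (subs : List (List Int)) (inter : List (List Int))
    (h : ∀ s ∈ subs, s ∈ inter) : verifInner j subs inter = inter := by
  induction subs with
  | nil => rfl
  | cons s rest ih =>
      simp only [verifInner]
      rw [if_neg (by simp [h s (List.mem_cons_self)]),
        ih (fun t ht => h t (List.mem_cons_of_mem _ ht))]

-- a Nodup subset of subs of the same length contains every element of subs
theorem full_of_length_eq (inter subs : List (List Int)) (hn : inter.Nodup)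
    (hsub : ∀ x ∈ inter, x ∈ subs) (hlen : inter.length = subs.length) :
    ∀ s ∈ subs, s ∈ inter := by
  intro s hs
  by_contra hns
  have hnodup : (inter ++ [s]).Nodup :=
    List.Nodup.append hn (List.nodup_singleton s) (by simpa using hns)
  have hsub' : (inter ++ [s]) ⊆ subs := by
    intro x hx
    rcases List.mem_append.1 hx with hx | hx
    · exact hsub x hx
    · simpa [List.mem_singleton.1 hx]
  have h2 := (hnodup.subperm hsub').length_le
  simp only [List.length_append, List.length_cons, List.length_nil] at h2
  omega

-- the combined effect of A's outer loop, with the 'continue' shortcut removed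
theorem verifOuter_eq (A : List Int) (subs : List (List Int)) :
    ∀ (C : List Int) (inter : List (List Int)), inter.Nodup → (∀ x ∈ inter, x ∈ subs) →
    verifOuter A subs C inter =
      if ∀ j ∈ C, j ∈ A then
        ((C.foldl (fun acc j => verifInner j subs acc) inter).length == subs.length)
      else false := by
  intro C
  induction C with
  | nil => intro inter _ _; simp [verifOuter]
  | cons j rest ih =>
      intro inter hn hsub
      simp only [verifOuter]
      by_cases hj : j ∈ A
      · have hstep : (if inter.length = subs.length then inter else verifInner j subs inter)
            = verifInner j subs inter := by
          split_ifs with hl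
          · exact (verifInner_noop j subs inter (full_of_length_eq inter subs hn hsub hl)).symm
          · rfl
        rw [if_pos hj, hstep,
          ih (verifInner j subs inter) (nodup_verifInner j subs inter hn)
            (fun x hx => ((mem_verifInner j subs inter x).1 hx).elim (hsub x) (fun h => h.1))]
        by_cases hrest : ∀ i ∈ rest, i ∈ A
        · rw [if_pos hrest, if_pos (by simpa [hj] using hrest)]
          simp [List.foldl_cons]
        · rw [if_neg hrest, if_neg (by simp [hrest])]
      · rw [if_neg hj, if_neg (by simp [hj])]

theorem mem_foldl_verifInner (subs : List (List Int)) (x : List Int) :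
    ∀ (C : List Int) (inter : List (List Int)),
    x ∈ C.foldl (fun acc j => verifInner j subs acc) inter ↔
      x ∈ inter ∨ (x ∈ subs ∧ ∃ j ∈ C, j ∈ x) := by
  intro C
  induction C with
  | nil => intro inter; simp
  | cons j rest ih =>
      intro inter
      simp only [List.foldl_cons, ih, mem_verifInner, List.mem_cons]
      constructor
      · rintro ((hx | ⟨hx, hj⟩) | ⟨hx, i, hi, hix⟩)
        · exact .inl hx
        · exact .inr ⟨hx, j, .inl rfl, hj⟩
        · exact .inr ⟨hx, i, .inr hi, hix⟩
      · rintro (hx | ⟨hx, i, (rfl | hi), hix⟩)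
        · exact .inl (.inl hx)
        · exact .inl (.inr ⟨hx, hix⟩)
        · exact .inr ⟨hx, i, hi, hix⟩

theorem nodup_foldl_verifInner (subs : List (List Int)) :
    ∀ (C : List Int) (inter : List (List Int)), inter.Nodup →
    (C.foldl (fun acc j => verifInner j subs acc) inter).Nodup := by
  intro C
  induction C with
  | nil => intro inter hn; exact hn
  | cons j rest ih =>
      intro inter hn
      exact ih _ (nodup_verifInner j subs inter hn)

-- B-side: elements of the 'hit' set
theorem mem_foldl_hit (cSet : PySem.Set Int) (x : List Int) :
    ∀ (subs : List (List Int)) (h : PySem.Set (List Int)),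
    x ∈ subs.foldl
        (fun h s => if s.any (fun e => PySem.Set.contains cSet e) then PySem.Set.add h s else h) h ↔
      x ∈ h ∨ (x ∈ subs ∧ ∃ e ∈ x, e ∈ cSet) := by
  intro subs
  induction subs with
  | nil => intro h; simp
  | cons s rest ih =>
      intro h
      simp only [List.foldl_cons, ih, List.mem_cons]
      split_ifs with hs
      · simp only [PySem.Set.mem_add]
        have hs' : ∃ e ∈ s, e ∈ cSet := by
          simpa [List.any_eq_true, PySem.Set.contains_iff] using hs
        constructor
        · rintro ((hx | rfl) | ⟨hx, he⟩)
          · exact .inl hx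
          · exact .inr ⟨.inl rfl, hs'⟩
          · exact .inr ⟨.inr hx, he⟩
        · rintro (hx | ⟨(rfl | hx), he⟩)
          · exact .inl (.inl hx)
          · exact .inl (.inr rfl)
          · exact .inr ⟨hx, he⟩
      · have hs' : ¬ ∃ e ∈ s, e ∈ cSet := by
          simpa [List.any_eq_true, PySem.Set.contains_iff] using hs
        constructor
        · rintro (hx | ⟨hx, he⟩)
          · exact .inl hx
          · exact .inr ⟨.inr hx, he⟩
        · rintro (hx | ⟨(rfl | hx), he⟩)
          · exact .inl hx
          · exact absurd he hs'
          · exact .inr ⟨hx, he⟩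

theorem nodup_foldl_hit (cSet : PySem.Set Int) :
    ∀ (subs : List (List Int)) (h : PySem.Set (List Int)), h.Nodup →
    (subs.foldl
        (fun h s => if s.any (fun e => PySem.Set.contains cSet e) then PySem.Set.add h s else h) h).Nodup := by
  intro subs
  induction subs with
  | nil => intro h hn; exact hn
  | cons s rest ih =>
      intro h hn
      simp only [List.foldl_cons]
      apply ih
      split_ifs
      · exact PySem.Set.nodup_add _ _ hn
      · exact hn

-- ===== VERDICT (by name: the statement is the Claim_ definition above) =====
theorem verificador_hitting_set_spec : Claim_equal_verificador_hitting_set := by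
  intro A C subs k _
  unfold Spec_verificador_hitting_set verificador_hitting_set verificador_hitting_set_alt
  by_cases hguard : (C.length : Int) > k ∨ C.length = 0
  · rw [if_pos hguard, if_pos (Or.comm.1 hguard)]
  · rw [if_neg hguard, if_neg (fun h => hguard (Or.comm.1 h)),
      verifOuter_eq A subs C [] List.nodup_nil (by simp)]
    by_cases hall : ∀ j ∈ C, j ∈ A
    · have hBc : ¬ ¬ (C.all (fun c => PySem.Set.contains (PySem.Set.ofList A) c)) = true := by
        simp only [List.all_eq_true, PySem.Set.contains_iff, PySem.Set.mem_ofList]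
        exact not_not_intro hall
      rw [if_pos hall, if_neg hBc]
      -- both results are Nodup lists with the same members, hence equal lengths
      have hperm :
          (C.foldl (fun acc j => verifInner j subs acc) []).Perm
            (subs.foldl (fun h s =>
              if s.any (fun e => PySem.Set.contains (PySem.Set.ofList C) e) then PySem.Set.add h s else h)
              PySem.Set.empty) := by
        rw [List.perm_ext_iff_of_nodup (nodup_foldl_verifInner subs C [] List.nodup_nil)
              (nodup_foldl_hit (PySem.Set.ofList C) subs PySem.Set.empty List.nodup_nil)]
        intro x
        rw [mem_foldl_verifInner, mem_foldl_hit]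
        simp only [PySem.Set.mem_ofList, PySem.Set.empty, List.not_mem_nil, false_or]
        constructor
        · rintro ⟨hx, j, hjC, hjx⟩; exact ⟨hx, j, hjx, hjC⟩
        · rintro ⟨hx, e, hex, heC⟩; exact ⟨hx, e, heC, hex⟩
      rw [hperm.length_eq]
    · have hBc : ¬ (C.all (fun c => PySem.Set.contains (PySem.Set.ofList A) c)) = true := by
        simp only [List.all_eq_true, PySem.Set.contains_iff, PySem.Set.mem_ofList]
        exact hall
      rw [if_neg hall, if_pos hBc]
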